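-- pv_equiv track=rewrite | github.com/gredas/pp1 | 09-Test2/p2.py | f
-- ===== SOURCE A (Python) =====
-- def f(human_age):
--     t=0
--     dog=0
--     while t!=human_age:
--         if t==0 or t==1:
--             dog+=10
--         else:
--             dog+=4
--         t+=1
--     return dog
-- ===== SOURCE B (Python) =====
-- def f(human_age):
--     # closed form: first two years count 10 each, every later year counts 4
--     if human_age < 2:
--         return 10 * human_age
--     return 4 * human_age + 12
-- ===== Notes on version B (the rewrite author's own statement) =====
-- stated objective: faster
-- what changed: Replaces the year-by-year accumulation loop with a closed-form arithmetic formula (10*n for n<2, else 4*n+12).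
-- outside the precondition, e.g. on f(-1): A does not finish within the time limit, B returns -10
import Mathlib
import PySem

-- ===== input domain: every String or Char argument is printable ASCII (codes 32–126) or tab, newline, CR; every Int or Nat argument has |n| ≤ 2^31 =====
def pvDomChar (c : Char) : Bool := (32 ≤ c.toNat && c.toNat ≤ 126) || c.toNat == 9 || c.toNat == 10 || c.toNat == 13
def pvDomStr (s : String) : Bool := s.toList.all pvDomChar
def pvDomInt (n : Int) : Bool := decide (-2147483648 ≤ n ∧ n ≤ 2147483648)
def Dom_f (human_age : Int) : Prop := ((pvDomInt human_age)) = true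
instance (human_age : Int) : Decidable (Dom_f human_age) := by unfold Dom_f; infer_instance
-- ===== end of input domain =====

-- B replaces A's year-by-year accumulation loop with a closed-form formula (O(1) vs O(n)).

-- ===== PORT A =====
-- A's while loop runs human_age iterations (t = 0 .. human_age-1); the Nat argument is
-- that iteration count (fuel making the recursion total; for human_age < 0 Python diverges,
-- excluded by Pre_f).
def fLoop : Nat → Int → Int → Int
  | 0, _, dog => dog
  | n+1, t, dog => fLoop n (t + 1) (dog + if t = 0 ∨ t = 1 then 10 else 4)

def f (human_age : Int) : Int := fLoop human_age.toNat 0 0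

-- ===== PORT B =====
def f_alt (human_age : Int) : Int :=
  if human_age < 2 then 10 * human_age else 4 * human_age + 12

-- ===== PRECONDITION & SPEC =====
-- Pre_f excludes negative human_age, on which A's while loop never terminates.
def Pre_f (human_age : Int) : Prop := 0 ≤ human_age
instance (human_age : Int) : Decidable (Pre_f human_age) := by unfold Pre_f; infer_instance
def pvWitness_f : Int := (7)

def Spec_f (human_age : Int) (out : Int) : Prop := out = f_alt human_age
instance (human_age : Int) (out : Int) : Decidable (Spec_f human_age out) := by unfold Spec_f; infer_instance

-- ===== CLAIM (what is proved, stated in full; the proofs are below) =====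
def Claim_equal_f : Prop := ∀ (human_age : Int), Dom_f human_age → Pre_f human_age → Spec_f human_age (f human_age)

-- ===== LEMMAS AND PROOFS =====
theorem fLoop_const (n : Nat) : ∀ (t dog : Int), 2 ≤ t → fLoop n t dog = dog + 4 * n := by
  induction n with
  | zero => intro t dog _; simp [fLoop]
  | succ k ih =>
    intro t dog ht
    have h0 : ¬ (t = 0 ∨ t = 1) := by omega
    simp only [fLoop, if_neg h0]
    rw [ih (t + 1) (dog + 4) (by omega)]
    push_cast; ring

-- ===== VERDICT (by name: the statement is the Claim_ definition above) =====
theorem f_spec : Claim_equal_f := by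
  intro human_age _ hpre
  unfold Spec_f f f_alt
  have hn : (human_age.toNat : Int) = human_age := Int.toNat_of_nonneg hpre
  rcases n : human_age.toNat with _ | _ | m
  · have : human_age = 0 := by omega
    simp [this, fLoop]
  · have : human_age = 1 := by omega
    simp [this, fLoop]
  · have hv : human_age = (m : Int) + 2 := by omega
    have h2 : ¬ human_age < 2 := by omega
    simp only [fLoop, if_neg h2]
    norm_num
    rw [fLoop_const m 2 20 (by omega)]
    omega
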